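-- pv_equiv track=rewrite | github.com/l337x911/AmBre | build/lib.linux-x86_64-2.7/ambre/analyze/utils.py | get_subalign_interval
-- ===== SOURCE A (Python) =====
-- def get_subalign_interval(align_range, cig_list, rc_flag):
--   frag_length = sum([a for a,b in cig_list if b!='D'])
--
--   sidx, eidx = align_range
--
--   start_length = sum([a for a,b in cig_list[:sidx] if b!='D'])
--   end_length = sum([a for a,b in cig_list[:eidx] if b!='D'])
--
--   if rc_flag:
--     return frag_length-start_length, frag_length-end_length
--   else:
--     return start_length, end_length
-- ===== SOURCE B (Python) =====
-- def get_subalign_interval(align_range, cig_list, rc_flag):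
--     n = len(cig_list)
--     # single pass: prefix sums of non-'D' lengths; pre[k] = summed length of first k entries
--     pre = [0]
--     for a, b in cig_list:
--         pre.append(pre[-1] + (a if b != 'D' else 0))
--
--     def clamp(i):
--         # Python slice semantics for cig_list[:i]
--         if i < 0:
--             i += n
--         return min(max(i, 0), n)
--
--     sidx, eidx = align_range
--     frag_length = pre[n]
--     start_length = pre[clamp(sidx)]
--     end_length = pre[clamp(eidx)]
--     if rc_flag:
--         return frag_length - start_length, frag_length - end_length
--     else:
--         return start_length, end_length
-- ===== Notes on version B (the rewrite author's own statement) =====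
-- stated objective: faster
-- what changed: Replaces three separate filtered scans (full list plus two slice copies) by one pass building a prefix-sum array of non-'D' lengths, then answers frag/start/end by clamped indexing into it.
import Mathlib
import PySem

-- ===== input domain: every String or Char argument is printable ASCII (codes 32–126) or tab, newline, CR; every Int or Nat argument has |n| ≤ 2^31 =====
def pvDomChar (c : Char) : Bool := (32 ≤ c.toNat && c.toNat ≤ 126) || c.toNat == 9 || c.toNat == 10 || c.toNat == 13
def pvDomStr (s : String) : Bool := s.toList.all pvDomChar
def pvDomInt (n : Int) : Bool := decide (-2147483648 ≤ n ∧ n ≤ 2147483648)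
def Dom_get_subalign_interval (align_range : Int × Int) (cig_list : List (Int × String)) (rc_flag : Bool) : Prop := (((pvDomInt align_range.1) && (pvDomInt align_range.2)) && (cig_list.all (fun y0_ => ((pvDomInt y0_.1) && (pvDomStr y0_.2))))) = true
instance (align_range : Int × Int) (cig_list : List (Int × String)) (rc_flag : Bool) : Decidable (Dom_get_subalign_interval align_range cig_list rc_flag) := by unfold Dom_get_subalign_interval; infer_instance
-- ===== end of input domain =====

-- B replaces A's three filtered scans (whole list + two slice copies) by one prefix-sum pass plus clamped indexing; return value only, no mutation.

-- ===== PORT A =====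
-- sum([a for a,b in l if b != 'D'])
def pvWSum (l : List (Int × String)) : Int :=
  ((l.filter (fun p => p.2 ≠ "D")).map (fun p => p.1)).sum

def get_subalign_interval (align_range : Int × Int) (cig_list : List (Int × String)) (rc_flag : Bool) : Int × Int :=
  let frag_length := pvWSum cig_list
  let sidx := align_range.1
  let eidx := align_range.2
  let start_length := pvWSum (PySem.List.slice cig_list none (some sidx))
  let end_length := pvWSum (PySem.List.slice cig_list none (some eidx))
  if rc_flag then (frag_length - start_length, frag_length - end_length)
  else (start_length, end_length)

-- ===== PORT B =====
-- pre = [0]; for a,b in cig_list: pre.append(pre[-1] + (a if b != 'D' else 0))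
def pvPre (cig_list : List (Int × String)) : List Int :=
  cig_list.foldl (fun pre p => pre ++ [(pre.getLast?.getD 0) + (if p.2 ≠ "D" then p.1 else 0)]) [0]

-- clamp(i): Python slice semantics for cig_list[:i]
def pvClamp (n : Int) (i : Int) : Int :=
  let i' := if i < 0 then i + n else i
  min (max i' 0) n

def get_subalign_interval_alt (align_range : Int × Int) (cig_list : List (Int × String)) (rc_flag : Bool) : Int × Int :=
  let n := PySem.List.len cig_list
  let pre := pvPre cig_list
  let frag_length := PySem.List.pyGetD pre n 0
  let start_length := PySem.List.pyGetD pre (pvClamp n align_range.1) 0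
  let end_length := PySem.List.pyGetD pre (pvClamp n align_range.2) 0
  if rc_flag then (frag_length - start_length, frag_length - end_length)
  else (start_length, end_length)

-- ===== PRECONDITION & SPEC =====
def Spec_get_subalign_interval (align_range : Int × Int) (cig_list : List (Int × String)) (rc_flag : Bool) (out : Int × Int) : Prop := out = get_subalign_interval_alt align_range cig_list rc_flag
instance (align_range : Int × Int) (cig_list : List (Int × String)) (rc_flag : Bool) (out : Int × Int) : Decidable (Spec_get_subalign_interval align_range cig_list rc_flag out) := by unfold Spec_get_subalign_interval; infer_instance

-- ===== CLAIM (what is proved, stated in full; the proofs are below) =====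
def Claim_equal_get_subalign_interval : Prop := ∀ (align_range : Int × Int) (cig_list : List (Int × String)) (rc_flag : Bool), Dom_get_subalign_interval align_range cig_list rc_flag → Spec_get_subalign_interval align_range cig_list rc_flag (get_subalign_interval align_range cig_list rc_flag)

-- ===== LEMMAS AND PROOFS =====

lemma pvWSum_append (xs ys : List (Int × String)) : pvWSum (xs ++ ys) = pvWSum xs + pvWSum ys := by
  simp [pvWSum]

lemma pvPre_append (cig : List (Int × String)) (p : Int × String) :
    pvPre (cig ++ [p]) = pvPre cig ++ [(pvPre cig).getLast?.getD 0 + (if p.2 ≠ "D" then p.1 else 0)] := by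
  simp [pvPre, List.foldl_append]

lemma pvWSum_single (p : Int × String) : pvWSum [p] = if p.2 ≠ "D" then p.1 else 0 := by
  by_cases h : p.2 = "D" <;> simp [pvWSum, h]

lemma pvPre_last (cig : List (Int × String)) : (pvPre cig).getLast?.getD 0 = pvWSum cig := by
  induction cig using List.reverseRecOn with
  | nil => simp [pvPre, pvWSum]
  | append_singleton xs p ih =>
    rw [pvPre_append, pvWSum_append, pvWSum_single]
    simp [ih]

lemma pvPre_get (cig : List (Int × String)) (k : Nat) (hk : k ≤ cig.length) :
    (pvPre cig)[k]? = some (pvWSum (cig.take k)) := by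
  induction cig using List.reverseRecOn generalizing k with
  | nil =>
    have hk0 : k = 0 := by simpa using hk
    subst hk0; simp [pvPre, pvWSum]
  | append_singleton xs p ih =>
    rw [pvPre_append]
    have hlen : (pvPre xs).length = xs.length + 1 := by
      clear ih hk
      induction xs using List.reverseRecOn with
      | nil => simp [pvPre]
      | append_singleton ys q ih2 => rw [pvPre_append]; simp [ih2]
    rcases Nat.lt_or_ge k (xs.length + 1) with h | h
    · rw [List.getElem?_append_left (by omega)]
      rw [ih k (by omega)]
      rw [List.take_append_of_le_length (by omega)]
    · have hk' : k = xs.length + 1 := by simp at hk; omega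
      subst hk'
      rw [List.getElem?_append_right (by omega)]
      rw [List.take_of_length_le (by simp)]
      simp [hlen, pvPre_last, pvWSum_append, pvWSum_single]

lemma pvSlice_eq_take (xs : List (Int × String)) (i : Int) :
    PySem.List.slice xs none (some i) = xs.take (pvClamp xs.length i).toNat := by
  rcases le_or_gt 0 i with h | h
  · rw [PySem.List.slice_to xs h]
    rcases le_or_gt i xs.length with h2 | h2
    · have : (pvClamp xs.length i).toNat = i.toNat := by simp [pvClamp]; omega
      rw [this]
    · have : (pvClamp xs.length i).toNat = xs.length := by simp [pvClamp]; omega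
      rw [this, List.take_of_length_le (by omega), List.take_of_length_le (le_refl _)]
  · have hk : i = -(((-i).toNat : Nat) : Int) := by omega
    rw [hk, PySem.List.slice_to_neg_natCast xs (-i).toNat (by omega)]
    have : (pvClamp xs.length (-(((-i).toNat : Nat) : Int))).toNat = xs.length - (-i).toNat := by
      simp [pvClamp]; omega
    rw [this]

lemma pvClamp_bounds (n i : Int) (hn : 0 ≤ n) : 0 ≤ pvClamp n i ∧ pvClamp n i ≤ n := by
  simp [pvClamp]; omega

lemma pvGetD_clamp (cig : List (Int × String)) (i : Int) :
    PySem.List.pyGetD (pvPre cig) (pvClamp (PySem.List.len cig) i) 0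
      = pvWSum (PySem.List.slice cig none (some i)) := by
  have hn : (PySem.List.len cig) = (cig.length : Int) := by simp [PySem.List.len_eq]
  obtain ⟨h0, h1⟩ := pvClamp_bounds (cig.length : Int) i (by positivity)
  rw [hn]
  rw [PySem.List.pyGetD_of_nonneg _ _ h0]
  rw [pvSlice_eq_take]
  have hle : (pvClamp (cig.length : Int) i).toNat ≤ cig.length := by omega
  rw [List.getD_eq_getElem?_getD, pvPre_get cig _ hle]
  simp

-- ===== VERDICT (by name: the statement is the Claim_ definition above) =====
theorem get_subalign_interval_spec : Claim_equal_get_subalign_interval := by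
  intro ar cig rc _
  show _ = _
  simp only [get_subalign_interval, get_subalign_interval_alt]
  have hfrag : PySem.List.pyGetD (pvPre cig) (PySem.List.len cig) 0 = pvWSum cig := by
    have : PySem.List.pyGetD (pvPre cig) (PySem.List.len cig) 0
        = PySem.List.pyGetD (pvPre cig) ((cig.length : Nat) : Int) 0 := by
      simp [PySem.List.len_eq]
    rw [this, PySem.List.pyGetD_natCast, List.getD_eq_getElem?_getD,
        pvPre_get cig cig.length (le_refl _)]
    simp
  rw [hfrag, pvGetD_clamp, pvGetD_clamp]
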